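-- pv_equiv track=rewrite | github.com/Wulfic/Cicada3301 | Tools/columnar_analysis_p32.py | read_diagonals
-- ===== SOURCE A (Python) =====
-- def read_diagonals(grid):
--     """Read diagonally"""
--     text = []
--     rows = len(grid)
--     cols = len(grid[0]) if grid else 0
--
--     # Main diagonals
--     for start_col in range(cols):
--         r, c = 0, start_col
--         while r < rows and c < cols:
--             if grid[r][c]:
--                 text.append(grid[r][c])
--             r += 1
--             c += 1
--
--     for start_row in range(1, rows):
--         r, c = start_row, 0
--         while r < rows and c < cols:
--             if grid[r][c]:
--                 text.append(grid[r][c])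
--             r += 1
--             c += 1
--
--     return ''.join(text)
-- ===== SOURCE B (Python) =====
-- def read_diagonals(grid):
--     """Read diagonally"""
--     rows = len(grid)
--     cols = len(grid[0]) if grid else 0
--     # one row-major scan, bucketing each truthy cell by its diagonal index c - r
--     buckets = {}
--     for r in range(rows):
--         row = grid[r]
--         for c in range(cols):
--             v = row[c]
--             if v:
--                 buckets.setdefault(c - r, []).append(v)
--     # emit diagonals in A's key order: 0..cols-1 then -1..-(rows-1)
--     order = list(range(cols)) + [-t for t in range(1, rows)]
--     parts = []
--     for k in order:
--         parts.extend(buckets.get(k, []))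
--     return ''.join(parts)
-- ===== Notes on version B (the rewrite author's own statement) =====
-- stated objective: alternative
-- what changed: Replaces A's per-diagonal walk loops with a single row-major scan that buckets truthy cells by diagonal index c-r in a dict, then concatenates the buckets in A's key order.
import Mathlib
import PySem

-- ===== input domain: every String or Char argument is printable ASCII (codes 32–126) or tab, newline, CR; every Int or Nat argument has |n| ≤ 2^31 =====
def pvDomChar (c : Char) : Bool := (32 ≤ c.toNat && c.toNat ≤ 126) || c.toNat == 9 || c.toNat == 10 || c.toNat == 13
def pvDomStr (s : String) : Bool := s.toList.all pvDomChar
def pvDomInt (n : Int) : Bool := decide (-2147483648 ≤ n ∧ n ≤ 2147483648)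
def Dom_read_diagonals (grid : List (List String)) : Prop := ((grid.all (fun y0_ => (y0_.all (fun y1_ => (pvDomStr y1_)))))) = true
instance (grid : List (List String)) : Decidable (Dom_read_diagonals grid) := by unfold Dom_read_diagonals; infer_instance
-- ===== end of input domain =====

-- B replaces A's per-diagonal walk loops with one row-major scan bucketing truthy cells
-- by diagonal index c-r in a dict, then concatenates buckets in A's key order (alternative decomposition, same cost).

-- ===== PORT A =====
-- diagonal while-loop of A; indices are always ≥ 0 in Python, so Nat indexing with
-- getD is exact inside Pre_ (outside Pre_ the Python raises IndexError).
def pvWalkA (grid : List (List String)) (rows cols : Nat) (r c : Nat) : List String :=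
  if _h : r < rows ∧ c < cols then
    (if (grid.getD r []).getD c "" ≠ "" then [(grid.getD r []).getD c ""] else [])
      ++ pvWalkA grid rows cols (r+1) (c+1)
  else []
termination_by rows - r
decreasing_by omega

def read_diagonals (grid : List (List String)) : String :=
  let rows := grid.length
  let cols := match grid with | [] => 0 | g0 :: _ => g0.length
  let text1 := (List.range cols).foldl (fun acc s => acc ++ pvWalkA grid rows cols 0 s) []
  let text2 := (List.range' 1 (rows - 1)).foldl (fun acc t => acc ++ pvWalkA grid rows cols t 0) text1
  String.join text2

-- ===== PORT B =====
def read_diagonals_alt (grid : List (List String)) : String :=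
  let rows := grid.length
  let cols := match grid with | [] => 0 | g0 :: _ => g0.length
  let buckets : PySem.Dict Int (List String) :=
    (List.range rows).foldl (fun d r =>
      let row := grid.getD r []
      (List.range cols).foldl (fun d c =>
        let v := row.getD c ""
        if v ≠ "" then d.modify ((c : Int) - (r : Int)) [] (· ++ [v]) else d) d)
      PySem.Dict.empty
  let order : List Int :=
    (List.range cols).map (fun s => Int.ofNat s) ++ (List.range' 1 (rows - 1)).map (fun t => -(Int.ofNat t))
  let parts := order.foldl (fun acc k => acc ++ buckets.getD k []) []
  String.join parts

-- ===== PRECONDITION & SPEC =====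
-- Pre_ excludes ragged grids in which some row is shorter than the first row:
-- there Python A (and B) raise IndexError reading grid[r][c] for c in range(len(grid[0])).
def Pre_read_diagonals (grid : List (List String)) : Prop :=
  ∀ row ∈ grid, (match grid with | [] => 0 | g0 :: _ => g0.length) ≤ row.length
instance (grid : List (List String)) : Decidable (Pre_read_diagonals grid) := by
  unfold Pre_read_diagonals; infer_instance
def pvWitness_read_diagonals : List (List String) := [["a", "", "b"], ["c", "d", "e"]]

def Spec_read_diagonals (grid : List (List String)) (out : String) : Prop := out = read_diagonals_alt grid
instance (grid : List (List String)) (out : String) : Decidable (Spec_read_diagonals grid out) := by unfold Spec_read_diagonals; infer_instance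

-- ===== CLAIM (what is proved, stated in full; the proofs are below) =====
def Claim_equal_read_diagonals : Prop := ∀ (grid : List (List String)), Dom_read_diagonals grid → Pre_read_diagonals grid → Spec_read_diagonals grid (read_diagonals grid)

-- ===== LEMMAS AND PROOFS =====

-- the cells of row `row` (index r), keyed by diagonal index c - r
def pvRowCells (row : List String) (cols : Nat) (r : Nat) : List (Int × String) :=
  (List.range cols).filterMap (fun c =>
    let v := row.getD c ""
    if v ≠ "" then some (((c : Int) - (r : Int)), v) else none)

-- contribution of row r to diagonal k (at most one cell)
def pvCellRow (row : List String) (cols : Nat) (k : Int) (r : Nat) : List String :=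
  if 0 ≤ (r : Int) + k ∧ (r : Int) + k < (cols : Int) then
    (let v := row.getD ((r : Int) + k).toNat ""
     if v ≠ "" then [v] else [])
  else []

-- the full diagonal k, rows top to bottom
def pvDiag (grid : List (List String)) (rows cols : Nat) (k : Int) : List String :=
  (List.range rows).flatMap (fun r => pvCellRow (grid.getD r []) cols k r)

-- A's walk along a diagonal collects exactly the per-row cells from r downward
theorem pvWalkA_eq (grid : List (List String)) (rows cols : Nat) (k : Int) :
    ∀ (r c : Nat), (c : Int) = (r : Int) + k →
      pvWalkA grid rows cols r c
        = (List.range' r (rows - r)).flatMap (fun r' => pvCellRow (grid.getD r' []) cols k r') := by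
  intro r c hc
  induction hn : rows - r generalizing r c with
  | zero =>
    rw [pvWalkA]
    have : ¬ (r < rows ∧ c < cols) := by omega
    simp [this]
  | succ n ih =>
    rw [pvWalkA]
    by_cases hcc : c < cols
    · have hrc : r < rows ∧ c < cols := ⟨by omega, hcc⟩
      rw [dif_pos hrc]
      have hrange : List.range' r (n+1) = r :: List.range' (r+1) n := by
        simp [List.range']
      rw [hrange, List.flatMap_cons]
      have hcell : pvCellRow (grid.getD r []) cols k r
          = (if (grid.getD r []).getD c "" ≠ "" then [(grid.getD r []).getD c ""] else []) := by
        have h0 : (0:Int) ≤ (r:Int) + k := by omega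
        have h1 : (r:Int) + k < (cols:Int) := by
          have : ((c:Int)) < (cols:Int) := by exact_mod_cast hcc
          omega
        have htn : ((r:Int) + k).toNat = c := by omega
        simp only [pvCellRow, if_pos (And.intro h0 h1), htn]
      rw [hcell, ih (r+1) (c+1) (by push_cast; omega) (by omega)]
    · rw [dif_neg (by omega)]
      symm
      rw [List.flatMap_eq_nil_iff]
      intro r' hr'
      have hge : r ≤ r' := (List.mem_range'_1.mp hr').1
      have : ¬ ((0:Int) ≤ (r':Int) + k ∧ (r':Int) + k < (cols:Int)) := by
        intro ⟨_, hlt⟩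
        have hcge : (cols:Int) ≤ (c:Int) := by exact_mod_cast Nat.le_of_not_lt hcc
        have : (r:Int) ≤ (r':Int) := by exact_mod_cast hge
        omega
      simp [pvCellRow, this]

theorem pvWalkA_start_col (grid : List (List String)) (rows cols : Nat) (s : Nat) :
    pvWalkA grid rows cols 0 s = pvDiag grid rows cols (s : Int) := by
  rw [pvWalkA_eq grid rows cols (s : Int) 0 s (by push_cast; ring)]
  simp [pvDiag, List.range_eq_range']

theorem pvWalkA_start_row (grid : List (List String)) (rows cols : Nat) (t : Nat)
    (h2 : t ≤ rows) :
    pvWalkA grid rows cols t 0 = pvDiag grid rows cols (-(t : Int)) := by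
  rw [pvWalkA_eq grid rows cols (-(t : Int)) t 0 (by push_cast; ring)]
  rw [pvDiag, List.range_eq_range']
  have hsplit : List.range' 0 rows = List.range' 0 t ++ List.range' t (rows - t) := by
    have h := List.range'_append (s := 0) (m := t) (n := rows - t) (step := 1)
    simp only [Nat.one_mul, Nat.zero_add] at h
    rw [h]
    congr 1
    omega
  rw [hsplit, List.flatMap_append]
  have hpre : List.flatMap (fun r' => pvCellRow (grid.getD r' []) cols (-(t : Int)) r') (List.range' 0 t) = [] := by
    rw [List.flatMap_eq_nil_iff]
    intro r' hr'
    have hlt : r' < t := by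
      have := List.mem_range'_1.mp hr'
      omega
    have : ¬ ((0:Int) ≤ (r':Int) + -(t:Int) ∧ (r':Int) + -(t:Int) < (cols:Int)) := by
      intro ⟨hge, _⟩
      have : (r':Int) < (t:Int) := by exact_mod_cast hlt
      omega
    simp only [pvCellRow]
    rw [if_neg this]
  rw [hpre, List.nil_append]

-- inner loop of B collects pvRowCells
theorem pvInner_eq (row : List String) (r : Nat) :
    ∀ (l : List Nat) (d : PySem.Dict Int (List String)),
      l.foldl (fun d c =>
        let v := row.getD c ""
        if v ≠ "" then d.modify ((c : Int) - (r : Int)) [] (· ++ [v]) else d) d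
      = ((l.filterMap (fun c =>
            let v := row.getD c ""
            if v ≠ "" then some (((c : Int) - (r : Int)), v) else none))).foldl
          (fun d p => d.modify p.1 [] (· ++ [p.2])) d := by
  intro l
  induction l with
  | nil => intro d; simp
  | cons c l ih =>
    intro d
    by_cases hv : row.getD c "" ≠ ""
    · simp only [List.foldl_cons, List.filterMap_cons, if_pos hv]
      rw [ih]
    · simp only [List.foldl_cons, List.filterMap_cons, if_neg hv]
      rw [ih]

-- one row's bucket entries for key k are exactly its diagonal contribution
theorem pvRowCells_filter (row : List String) (r : Nat) (k : Int) :
    ∀ (cols : Nat),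
      ((pvRowCells row cols r).filter (fun p => p.1 == k)).map (·.2) = pvCellRow row cols k r := by
  intro cols
  induction cols with
  | zero =>
    have : ¬ ((0:Int) ≤ (r:Int) + k ∧ (r:Int) + k < ((0:Nat):Int)) := by
      intro ⟨h0, h1⟩; simp at h1; omega
    simp [pvRowCells, pvCellRow]
  | succ n ih =>
    rw [pvRowCells, List.range_succ, List.filterMap_append, List.filter_append, List.map_append]
    rw [show (List.range n).filterMap (fun c =>
        let v := row.getD c ""
        if v ≠ "" then some (((c : Int) - (r : Int)), v) else none) = pvRowCells row n r from rfl]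
    rw [ih]
    by_cases hk : (r:Int) + k = (n:Int)
    · -- the new column n lies on diagonal k; the old bound excluded it
      have hold : ¬ ((0:Int) ≤ (r:Int) + k ∧ (r:Int) + k < (n:Int)) := by omega
      have hnew : (0:Int) ≤ (r:Int) + k ∧ (r:Int) + k < ((n+1 : Nat):Int) := by
        constructor
        · omega
        · push_cast; omega
      have hkey : ((n:Int) - (r:Int) == k) = true := by
        simp only [beq_iff_eq]; omega
      have htn : ((r:Int) + k).toNat = n := by omega
      simp only [pvCellRow, if_neg hold, if_pos hnew, htn]
      by_cases hv : row[n]?.getD "" = ""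
      · simp [List.getD, hv]
      · simp [List.getD, hv, hkey]
    · -- column n is on another diagonal: nothing is added and the bound change is vacuous
      have hkey : (((n:Int) - (r:Int)) == k) = false := by
        simp only [beq_eq_false_iff_ne]; omega
      have hsame : pvCellRow row (n+1) k r = pvCellRow row n k r := by
        by_cases hin : (0:Int) ≤ (r:Int) + k ∧ (r:Int) + k < (n:Int)
        · have hin' : (0:Int) ≤ (r:Int) + k ∧ (r:Int) + k < ((n+1 : Nat):Int) := by
            constructor
            · omega
            · push_cast; omega
          simp only [pvCellRow, if_pos hin, if_pos hin']
        · have hin' : ¬ ((0:Int) ≤ (r:Int) + k ∧ (r:Int) + k < ((n+1 : Nat):Int)) := by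
            intro ⟨h0, h1⟩
            push_cast at h1
            omega
          simp only [pvCellRow, if_neg hin, if_neg hin']
      rw [hsame]
      by_cases hv : row[n]?.getD "" = ""
      · simp [List.getD, hv]
      · simp only [beq_eq_false_iff_ne, ne_eq] at hkey
        simp [List.getD, hv, hkey]

-- a loop of loops is the loop over the concatenation
theorem pvFoldlFoldl (g : Nat → List (Int × String)) :
    ∀ (L : List Nat) (d : PySem.Dict Int (List String)),
      L.foldl (fun d r => (g r).foldl (fun d p => d.modify p.1 [] (· ++ [p.2])) d) d
        = (L.flatMap g).foldl (fun d p => d.modify p.1 [] (· ++ [p.2])) d := by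
  intro L
  induction L with
  | nil => intro d; simp
  | cons r L ih =>
    intro d
    simp only [List.foldl_cons, List.flatMap_cons, List.foldl_append]
    exact ih _

-- B's buckets, read at key k, give the full diagonal
theorem pvBuckets_getD (grid : List (List String)) (rows cols : Nat) (k : Int) :
    ((List.range rows).foldl (fun d r =>
      let row := grid.getD r []
      (List.range cols).foldl (fun d c =>
        let v := row.getD c ""
        if v ≠ "" then d.modify ((c : Int) - (r : Int)) [] (· ++ [v]) else d) d)
      (PySem.Dict.empty : PySem.Dict Int (List String))).getD k []
    = pvDiag grid rows cols k := by
  have hinner : (List.range rows).foldl (fun d r =>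
      let row := grid.getD r []
      (List.range cols).foldl (fun d c =>
        let v := row.getD c ""
        if v ≠ "" then d.modify ((c : Int) - (r : Int)) [] (· ++ [v]) else d) d)
      (PySem.Dict.empty : PySem.Dict Int (List String))
    = (List.range rows).foldl (fun d r =>
        (pvRowCells (grid.getD r []) cols r).foldl (fun d p => d.modify p.1 [] (· ++ [p.2])) d)
      PySem.Dict.empty := by
    apply PySem.List.foldl_congr_mem
    intro acc r _
    exact pvInner_eq (grid.getD r []) r (List.range cols) acc
  rw [hinner]
  rw [pvFoldlFoldl (fun r => pvRowCells (grid.getD r []) cols r) (List.range rows) PySem.Dict.empty]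
  rw [PySem.Dict.getD_foldl_modify_append]
  simp only [PySem.Dict.getD_empty, List.nil_append]
  rw [pvDiag, List.filter_flatMap, List.map_flatMap]
  apply List.flatMap_congr
  intro r _
  exact pvRowCells_filter (grid.getD r []) r k cols

-- ===== VERDICT (by name: the statement is the Claim_ definition above) =====
theorem read_diagonals_spec : Claim_equal_read_diagonals := by
  intro grid _ _
  show read_diagonals grid = read_diagonals_alt grid
  simp only [read_diagonals, read_diagonals_alt]
  rw [PySem.List.foldl_append_eq_flatMap, PySem.List.foldl_append_eq_flatMap,
      PySem.List.foldl_append_eq_flatMap]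
  rw [List.flatMap_append, List.flatMap_map, List.flatMap_map]
  simp only [List.nil_append]
  congr 1
  congr 1
  · apply List.flatMap_congr
    intro s _
    rw [pvWalkA_start_col, pvBuckets_getD]
    rfl
  · apply List.flatMap_congr
    intro t ht
    have hm := List.mem_range'_1.mp ht
    rw [pvWalkA_start_row grid _ _ t (by omega), pvBuckets_getD]
    rfl
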